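-- pv_equiv track=rewrite | github.com/UnitTestStudio/unlearning | utils.py | filter_json_by_keywords
-- ===== SOURCE A (Python) =====
-- def filter_json_by_keywords(data, keywords):
--     """Recursively filter JSON data for key/value pairs where the value contains any of the keywords."""
--     filtered_data = []
--
--     # Convert keywords to lowercase for case-insensitive comparison
--     keywords_lower = [keyword.lower() for keyword in keywords]
--
--     for item in data:
--         if isinstance(item, dict):
--             filtered_item = {}
--             for key, value in item.items():
--                 if isinstance(value, str):
--                     # Check if any keyword is in the value
--                     if any(keyword in value.lower() for keyword in keywords_lower):
--                         filtered_item[key] = value  # Add the key/value pair if any keyword matches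
--             if filtered_item:  # Only add non-empty results
--                 filtered_data.append(filtered_item)
--
--     return filtered_data
-- ===== SOURCE B (Python) =====
-- def filter_json_by_keywords(data, keywords):
--     """Filter dicts to the key/value pairs whose string value contains any keyword
--     (case-insensitive), using a first-character index over the lowered keywords and a
--     single left-to-right scan of each lowered value."""
--     kws = [kw.lower() for kw in keywords]
--     has_empty = "" in kws
--     index = {}
--     for kw in kws:
--         if kw:
--             index.setdefault(kw[0], []).append(kw)
--
--     def matches(value):
--         if not isinstance(value, str):
--             return False
--         if has_empty:
--             return True  # the empty keyword occurs in every string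
--         low = value.lower()
--         for i, c in enumerate(low):
--             for kw in index.get(c, ()):
--                 if low[i:i + len(kw)] == kw:
--                     return True
--         return False
--
--     shrunk = ({k: v for k, v in item.items() if matches(v)}
--               for item in data if isinstance(item, dict))
--     return [d for d in shrunk if d]
-- ===== Notes on version B (the rewrite author's own statement) =====
-- stated objective: faster
-- what changed: B replaces A's keyword-major loop of independent substring searches (one 'kw in value.lower()' scan per keyword, re-lowercasing the value each time) with a multi-pattern matcher: it builds a first-character dict index of the lowered keywords once, then decides each value by a single left-to-right scan of the lowered value, testing only the keywords bucketed under the current character (an empty keyword trivially matches everything); the value is lowered once and most positions touch no keyword at all.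
import Mathlib
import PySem

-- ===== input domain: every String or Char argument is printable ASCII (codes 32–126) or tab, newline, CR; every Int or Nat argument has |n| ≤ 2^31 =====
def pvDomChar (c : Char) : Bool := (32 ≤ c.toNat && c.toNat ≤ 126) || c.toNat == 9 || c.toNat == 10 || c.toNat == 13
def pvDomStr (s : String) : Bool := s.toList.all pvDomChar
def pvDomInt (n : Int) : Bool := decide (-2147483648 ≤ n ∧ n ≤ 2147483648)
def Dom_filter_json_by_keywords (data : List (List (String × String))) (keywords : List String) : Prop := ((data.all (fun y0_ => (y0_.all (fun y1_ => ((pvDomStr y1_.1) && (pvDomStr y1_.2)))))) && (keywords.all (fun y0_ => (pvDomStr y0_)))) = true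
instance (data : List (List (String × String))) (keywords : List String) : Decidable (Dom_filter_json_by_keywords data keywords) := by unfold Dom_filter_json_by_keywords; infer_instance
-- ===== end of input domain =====

-- B decides each value with a first-character index over the lowered keywords and one
-- left-to-right scan of the lowered value (only the keywords bucketed under the current
-- character are tested per position; measured faster by a constant factor), instead of
-- A's keyword-major loop of independent substring searches that re-lowercases the value
-- per keyword (objective: faster).
-- Each inner assoc list is read as the Python dict it denotes via PySem.Dict.ofList in
-- both ports (the type convention's dict decoding). B's string slice low[i:i+len(kw)]
-- with 0 ≤ i is ported with PySem.Str.slice (exact); 'index.setdefault(kw[0], []).append(kw)'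
-- is ported as insert of (getD ++ [kw]), its exact final mapping and key order.

-- ===== PORT A =====
def filter_json_by_keywords (data : List (List (String × String))) (keywords : List String) : List (List (String × String)) :=
  -- keywords_lower = [keyword.lower() for keyword in keywords]
  let keywords_lower := keywords.map (fun keyword => PySem.Str.lower keyword)
  data.foldl (fun filtered_data item =>
    -- for key, value in item.items(): if any(keyword in value.lower() …): filtered_item[key] = value
    let filtered_item := (PySem.Dict.ofList item).items.foldl
      (fun fi kv =>
        if keywords_lower.any (fun keyword => PySem.Str.isIn keyword (PySem.Str.lower kv.2))
        then fi.insert kv.1 kv.2 else fi)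
      (PySem.Dict.empty : PySem.Dict String String)
    -- if filtered_item: filtered_data.append(filtered_item)
    if filtered_item.items.isEmpty then filtered_data
    else filtered_data ++ [filtered_item.items]) []

-- ===== PORT B =====
def filter_json_by_keywords_alt (data : List (List (String × String))) (keywords : List String) : List (List (String × String)) :=
  -- kws = [kw.lower() for kw in keywords]; has_empty = "" in kws
  let kws := keywords.map (fun kw => PySem.Str.lower kw)
  let has_empty := kws.contains ""
  -- for kw in kws: if kw: index.setdefault(kw[0], []).append(kw)
  let index : PySem.Dict Char (List String) := kws.foldl (fun d kw =>
      match kw.toList with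
      | [] => d
      | c :: _ => d.insert c (d.getD c [] ++ [kw])) PySem.Dict.empty
  -- matches(value): empty keyword → True; else scan low once, test only the bucket of low[i]
  let matchesKw := fun (v : String) =>
    if has_empty then true
    else
      let low := PySem.Str.lower v
      (PySem.List.enumerate low.toList).any (fun ic =>
        (index.getD ic.2 []).any (fun kw =>
          PySem.Str.slice low (some ic.1) (some (ic.1 + PySem.Str.len kw)) == kw))
  -- [d for d in ({k: v for k, v in item.items() if matches(v)} for item in data) if d]
  ((data.map (fun item => (PySem.Dict.ofList item).items.filter (fun kv => matchesKw kv.2))).filter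
    (fun d => !d.isEmpty))

-- ===== PRECONDITION & SPEC =====
def Spec_filter_json_by_keywords (data : List (List (String × String))) (keywords : List String) (out : List (List (String × String))) : Prop := out = filter_json_by_keywords_alt data keywords
instance (data : List (List (String × String))) (keywords : List String) (out : List (List (String × String))) : Decidable (Spec_filter_json_by_keywords data keywords out) := by unfold Spec_filter_json_by_keywords; infer_instance

-- ===== CLAIM (what is proved, stated in full; the proofs are below) =====
def Claim_equal_filter_json_by_keywords : Prop := ∀ (data : List (List (String × String))) (keywords : List String), Dom_filter_json_by_keywords data keywords → Spec_filter_json_by_keywords data keywords (filter_json_by_keywords data keywords)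

-- ===== LEMMAS AND PROOFS =====

-- B's index bucket for c holds exactly the keywords whose first character is c, in order
theorem pv_bucket (kws : List String) :
    ∀ (d : PySem.Dict Char (List String)) (c : Char),
      ((kws.foldl (fun d kw =>
          match kw.toList with
          | [] => d
          | c :: _ => d.insert c (d.getD c [] ++ [kw])) d).getD c [])
      = d.getD c [] ++ kws.filter (fun kw => kw.toList.head? == some c) := by
  induction kws with
  | nil => simp
  | cons kw kws ih =>
    intro d c
    simp only [List.foldl_cons]
    cases h : kw.toList with
    | nil => rw [ih]; simp [h]
    | cons ch t =>
      rw [ih]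
      show (d.insert ch (d.getD ch [] ++ [kw])).getD c [] ++ _ = _
      rw [PySem.Dict.getD_insert]
      by_cases hc : c = ch
      · subst hc; simp [h]
      · simp [h, hc, Ne.symm hc]

-- B's position-major bucketed scan finds a match iff some keyword occurs in the value
theorem pv_scan (B : List String) (low : String)
    (hne : ∀ kw ∈ B, kw.toList ≠ []) :
    ((PySem.List.enumerate low.toList).any (fun ic =>
        (B.filter (fun kw => kw.toList.head? == some ic.2)).any (fun kw =>
          PySem.Str.slice low (some ic.1) (some (ic.1 + PySem.Str.len kw)) == kw)))
      = B.any (fun kw => PySem.Str.isIn kw low) := by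
  rw [Bool.eq_iff_iff, List.any_eq_true, List.any_eq_true]
  constructor
  · rintro ⟨ic, hic, hpred⟩
    obtain ⟨k, hk, rfl⟩ := (PySem.List.mem_enumerate_iff _ _ _).mp hic
    obtain ⟨kw, hkwmem, hsl⟩ := List.any_eq_true.mp hpred
    refine ⟨kw, (List.mem_filter.mp hkwmem).1, ?_⟩
    -- the matched slice is kw, so kw is a prefix of low.toList.drop k, hence an occurrence
    have hsl' : PySem.Str.slice low (some ((0:Int) + k)) (some (((0:Int) + k) + PySem.Str.len kw)) = kw :=
      eq_of_beq hsl
    have htl := congrArg String.toList hsl'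
    rw [PySem.Str.toList_slice, PySem.Chars.slice_eq_listSlice, PySem.Str.len_eq] at htl
    have hcast : ((0:Int) + k) = ((k : Nat) : Int) := by omega
    rw [hcast] at htl
    have hcast2 : ((k : Nat) : Int) + ((kw.toList.length : Nat) : Int) = (((k + kw.toList.length : Nat)) : Int) := by
      push_cast; ring
    rw [hcast2, PySem.List.slice_natCast] at htl
    have hpre : kw.toList <+: low.toList.drop k := by
      rw [← htl]
      exact List.take_prefix _ _
    rw [PySem.Str.isIn_eq, ← PySem.Chars.exists_prefix_drop_iff_isIn]
    exact ⟨k, hpre⟩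
  · rintro ⟨kw, hkw, hin⟩
    rw [PySem.Str.isIn_eq, ← PySem.Chars.exists_prefix_drop_iff_isIn] at hin
    obtain ⟨j, hpre⟩ := hin
    cases hkt : kw.toList with
    | nil => exact absurd hkt (hne kw hkw)
    | cons c t =>
      rw [hkt] at hpre
      have hdropne : low.toList.drop j ≠ [] := by
        intro hnil; rw [hnil] at hpre
        exact absurd (List.eq_nil_of_prefix_nil hpre) (by simp)
      have hj : j < low.toList.length := by
        by_contra hle
        exact hdropne (List.drop_eq_nil_iff.mpr (by omega))
      have hlt0 : 0 < (low.toList.drop j).length := by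
        rw [List.length_drop]; omega
      -- low[j] is kw's first character
      have hhead : low.toList[j] = c := by
        obtain ⟨rest, hrest⟩ := hpre
        have : (low.toList.drop j)[0]'hlt0 = c := by
          simp [← hrest]
        rw [List.getElem_drop] at this
        simpa using this
      refine ⟨((0:Int) + j, low.toList[j]), (PySem.List.mem_enumerate_iff _ _ _).mpr ⟨j, hj, rfl⟩, ?_⟩
      rw [List.any_eq_true]
      refine ⟨kw, List.mem_filter.mpr ⟨hkw, by simp [hkt, hhead]⟩, ?_⟩
      -- the slice at position j of length len(kw) is exactly kw
      have htake : (low.toList.drop j).take kw.toList.length = kw.toList := by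
        rw [hkt] at *
        exact ((List.prefix_iff_eq_take.mp hpre)).symm
      have : PySem.Str.slice low (some ((0:Int) + j)) (some (((0:Int) + j) + PySem.Str.len kw)) = kw := by
        apply String.toList_inj.mp
        rw [PySem.Str.toList_slice, PySem.Chars.slice_eq_listSlice, PySem.Str.len_eq]
        have hcast : ((0:Int) + j) = ((j : Nat) : Int) := by omega
        have hcast2 : ((j : Nat) : Int) + ((kw.toList.length : Nat) : Int) = (((j + kw.toList.length : Nat)) : Int) := by
          push_cast; ring
        rw [hcast, hcast2, PySem.List.slice_natCast]
        have harith : j + kw.toList.length - j = kw.toList.length := by omega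
        rw [harith, htake]
      rw [beq_iff_eq]
      exact this

-- a conditional-insert fold over pairs with fresh distinct keys is a filter on items
theorem pv_foldl_insert_filter (C : String × String → Bool) :
    ∀ (l : List (String × String)) (d : PySem.Dict String String),
      (∀ kv ∈ l, d.contains kv.1 = false) → (l.map Prod.fst).Nodup →
      (l.foldl (fun fi kv => if C kv then fi.insert kv.1 kv.2 else fi) d).items
        = d.items ++ l.filter C := by
  intro l
  induction l with
  | nil => simp
  | cons kv l ih =>
    intro d h1 h2
    simp only [List.map_cons, List.nodup_cons, List.mem_map] at h2
    simp only [List.foldl_cons]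
    by_cases hc : C kv = true
    · have hfresh : d.contains kv.1 = false := h1 kv (List.mem_cons_self ..)
      have h1' : ∀ kv' ∈ l, (d.insert kv.1 kv.2).contains kv'.1 = false := by
        intro kv' hkv'
        rw [PySem.Dict.contains_insert]
        have hne : kv'.1 ≠ kv.1 := by
          intro he; exact h2.1 ⟨kv', hkv', he⟩
        simp [hne, h1 kv' (List.mem_cons_of_mem _ hkv')]
      rw [hc, if_pos rfl, ih (d.insert kv.1 kv.2) h1' h2.2,
        PySem.Dict.items_insert_of_not_contains d kv.2 hfresh]
      simp [hc]
    · rw [if_neg hc, ih d (fun kv' h => h1 kv' (List.mem_cons_of_mem _ h)) h2.2,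
        List.filter_cons_of_neg hc]

-- B's per-value decision agrees with A's "any lowered keyword occurs in value.lower()"
theorem pv_matches_eq (keywords : List String) (v : String) :
    (if (keywords.map (fun kw => PySem.Str.lower kw)).contains "" then true
     else
       (PySem.List.enumerate (PySem.Str.lower v).toList).any (fun ic =>
         (((keywords.map (fun kw => PySem.Str.lower kw)).foldl (fun d kw =>
             match kw.toList with
             | [] => d
             | c :: _ => d.insert c (d.getD c [] ++ [kw])) PySem.Dict.empty).getD ic.2 []).any (fun kw =>
           PySem.Str.slice (PySem.Str.lower v) (some ic.1) (some (ic.1 + PySem.Str.len kw)) == kw)))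
    = (keywords.map (fun keyword => PySem.Str.lower keyword)).any
        (fun keyword => PySem.Str.isIn keyword (PySem.Str.lower v)) := by
  by_cases hemp : (keywords.map (fun kw => PySem.Str.lower kw)).contains "" = true
  · rw [if_pos hemp]
    have hmem : "" ∈ keywords.map (fun kw => PySem.Str.lower kw) :=
      List.contains_iff_mem.mp hemp
    exact (List.any_eq_true.mpr ⟨"", hmem, by
      rw [PySem.Str.isIn_eq]; exact PySem.Chars.isIn_nil _⟩).symm
  · rw [if_neg hemp]
    have hne : ∀ kw ∈ keywords.map (fun kw => PySem.Str.lower kw), kw.toList ≠ [] := by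
      intro kw hkw hnil
      exact hemp (List.contains_iff_mem.mpr (by
        rwa [String.toList_eq_nil_iff.mp hnil] at hkw))
    have hb := pv_bucket (keywords.map (fun kw => PySem.Str.lower kw)) PySem.Dict.empty
    simp only [hb, PySem.Dict.getD_empty, List.nil_append]
    exact pv_scan (keywords.map (fun kw => PySem.Str.lower kw)) (PySem.Str.lower v) hne

-- ===== VERDICT (by name: the statement is the Claim_ definition above) =====
theorem filter_json_by_keywords_spec : Claim_equal_filter_json_by_keywords := by
  intro data keywords _
  unfold Spec_filter_json_by_keywords filter_json_by_keywords filter_json_by_keywords_alt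
  -- B's matches agrees with A's per-pair predicate
  have hpred : (fun kv : String × String =>
        (if (keywords.map (fun kw => PySem.Str.lower kw)).contains "" then true
         else
           (PySem.List.enumerate (PySem.Str.lower kv.2).toList).any (fun ic =>
             (((keywords.map (fun kw => PySem.Str.lower kw)).foldl (fun d kw =>
                 match kw.toList with
                 | [] => d
                 | c :: _ => d.insert c (d.getD c [] ++ [kw])) PySem.Dict.empty).getD ic.2 []).any (fun kw =>
               PySem.Str.slice (PySem.Str.lower kv.2) (some ic.1) (some (ic.1 + PySem.Str.len kw)) == kw))))
      = (fun kv : String × String =>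
          (keywords.map (fun keyword => PySem.Str.lower keyword)).any
            (fun keyword => PySem.Str.isIn keyword (PySem.Str.lower kv.2))) := by
    funext kv
    exact pv_matches_eq keywords kv.2
  -- A's inner fold computes the filtered item list
  have hinner : ∀ item : List (String × String),
      ((PySem.Dict.ofList item).items.foldl
        (fun fi kv =>
          if (keywords.map (fun keyword => PySem.Str.lower keyword)).any
              (fun keyword => PySem.Str.isIn keyword (PySem.Str.lower kv.2))
          then fi.insert kv.1 kv.2 else fi)
        (PySem.Dict.empty : PySem.Dict String String)).items
      = (PySem.Dict.ofList item).items.filter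
          (fun kv => (keywords.map (fun keyword => PySem.Str.lower keyword)).any
            (fun keyword => PySem.Str.isIn keyword (PySem.Str.lower kv.2))) := by
    intro item
    rw [pv_foldl_insert_filter
      (fun kv => (keywords.map (fun keyword => PySem.Str.lower keyword)).any
        (fun keyword => PySem.Str.isIn keyword (PySem.Str.lower kv.2)))
      (PySem.Dict.ofList item).items PySem.Dict.empty
      (fun kv _ => PySem.Dict.contains_empty kv.1) (PySem.Dict.nodup_keys_ofList item)]
    simp [PySem.Dict.empty]
  simp only [hinner, hpred]
  -- A's outer fold, rewritten to the append-if shape, is map-then-filter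
  have houter : (fun (filtered_data : List (List (String × String))) (item : List (String × String)) =>
        if ((PySem.Dict.ofList item).items.filter
            (fun kv => (keywords.map (fun keyword => PySem.Str.lower keyword)).any
              (fun keyword => PySem.Str.isIn keyword (PySem.Str.lower kv.2)))).isEmpty
        then filtered_data
        else filtered_data ++ [(PySem.Dict.ofList item).items.filter
          (fun kv => (keywords.map (fun keyword => PySem.Str.lower keyword)).any
            (fun keyword => PySem.Str.isIn keyword (PySem.Str.lower kv.2)))])
      = (fun filtered_data item =>
        if !((PySem.Dict.ofList item).items.filter
            (fun kv => (keywords.map (fun keyword => PySem.Str.lower keyword)).any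
              (fun keyword => PySem.Str.isIn keyword (PySem.Str.lower kv.2)))).isEmpty
        then filtered_data ++ [(PySem.Dict.ofList item).items.filter
          (fun kv => (keywords.map (fun keyword => PySem.Str.lower keyword)).any
            (fun keyword => PySem.Str.isIn keyword (PySem.Str.lower kv.2)))]
        else filtered_data) := by
    funext acc item
    by_cases h : ((PySem.Dict.ofList item).items.filter
        (fun kv => (keywords.map (fun keyword => PySem.Str.lower keyword)).any
          (fun keyword => PySem.Str.isIn keyword (PySem.Str.lower kv.2)))).isEmpty = true
    · simp only [h]
      simp
    · rw [Bool.not_eq_true] at h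
      simp only [h]
      simp
  rw [houter, PySem.List.foldl_append_if, List.filter_map]
  rfl
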